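-- pv_equiv track=rewrite | github.com/CDMY0417/Tool_MATH | function_tools/function_total/5g8cx1.py | add_base_12
-- ===== SOURCE A (Python) =====
-- def add_base_12(num1: list[int], num2: list[int]) -> list[int]:
--     # Reverse the lists to make addition easier
--     num1 = num1[::-1]
--     num2 = num2[::-1]
--     max_len = max(len(num1), len(num2))
--     carry = 0
--     result = []
--
--     for i in range(max_len):
--         digit1 = num1[i] if i < len(num1) else 0
--         digit2 = num2[i] if i < len(num2) else 0
--         # Base 12 addition
--         total = digit1 + digit2 + carry
--         carry = total // 12
--         result.append(total % 12)
--
--     if carry > 0: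
--         result.append(carry)
--
--     # Reverse result to get the correct order
--     return result[::-1]
-- ===== SOURCE B (Python) =====
-- def add_base_12(num1: list[int], num2: list[int]) -> list[int]:
--     # Closed form: evaluate both digit lists as integers (divide and conquer),
--     # add once, then split the sum with a single divmod into the leading carry
--     # and max_len base-12 digits (extracted by recursive halving).
--     total = _val(num1) + _val(num2)
--     max_len = max(len(num1), len(num2))
--     carry, lower = divmod(total, 12 ** max_len)
--     digits = _digits(lower, max_len)
--     return ([carry] if carry > 0 else []) + digits
--
--
-- def _val(xs):
--     n = len(xs)
--     if n == 0:
--         return 0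
--     if n == 1:
--         return xs[0]
--     m = n // 2
--     return _val(xs[:m]) * 12 ** (n - m) + _val(xs[m:])
--
--
-- def _digits(v, n):
--     if n == 0:
--         return []
--     if n == 1:
--         return [v % 12]
--     m = n // 2
--     hi, lo = divmod(v, 12 ** m)
--     return _digits(hi, n - m) + _digits(lo, m)
-- ===== Notes on version B (the rewrite author's own statement) =====
-- stated objective: alternative
-- what changed: Replaces A's per-position carry-propagation loop over reversed lists with a closed-form computation: evaluate both digit lists as integers by divide-and-conquer, add once, split the sum into carry and remainder with a single divmod, and extract the max_len base-12 digits by recursive halving.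
import Mathlib
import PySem

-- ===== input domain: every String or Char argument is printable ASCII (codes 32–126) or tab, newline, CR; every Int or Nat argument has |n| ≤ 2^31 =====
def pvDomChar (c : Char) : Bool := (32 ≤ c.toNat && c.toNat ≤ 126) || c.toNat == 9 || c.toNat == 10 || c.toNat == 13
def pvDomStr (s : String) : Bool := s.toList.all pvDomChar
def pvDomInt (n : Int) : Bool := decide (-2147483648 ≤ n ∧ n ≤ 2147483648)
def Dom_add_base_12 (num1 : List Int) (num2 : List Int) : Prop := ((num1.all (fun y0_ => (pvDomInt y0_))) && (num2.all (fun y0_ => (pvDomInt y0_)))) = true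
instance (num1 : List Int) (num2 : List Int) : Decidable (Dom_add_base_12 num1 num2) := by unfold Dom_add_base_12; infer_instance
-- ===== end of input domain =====

-- B replaces A's per-position carry loop by one bulk addition: evaluate both digit lists
-- as integers (divide and conquer), add once, and split the sum with a single divmod into
-- max_len base-12 digits plus the leading carry (objective: alternative algorithm).

-- ===== PORT A =====
-- A's per-position loop: for i in range(max_len) with state (carry, result).
def add_base_12 (num1 : List Int) (num2 : List Int) : List Int :=
  -- num1[::-1] / num2[::-1]  (reverse; PySem.List.slice?_none_none_neg_one)
  let n1 := num1.reverse
  let n2 := num2.reverse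
  let maxLen : Nat := max n1.length n2.length
  let st := (PySem.List.pyRange 0 (maxLen : Int) 1).foldl
    (fun (s : Int × List Int) i =>
      let digit1 : Int := if i < (n1.length : Int) then PySem.List.pyGetD n1 i 0 else 0
      let digit2 : Int := if i < (n2.length : Int) then PySem.List.pyGetD n2 i 0 else 0
      let total := digit1 + digit2 + s.1
      (PySem.Int.floordiv total 12, s.2 ++ [PySem.Int.mod total 12]))
    ((0 : Int), ([] : List Int))
  let result := if st.1 > 0 then st.2 ++ [st.1] else st.2
  -- result[::-1]
  result.reverse

-- ===== PORT B =====
-- _val(xs): big-endian value of a digit list by divide and conquer (xs[:m] / xs[m:] are slices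
-- with Nat bounds: take/drop, PySem.List.slice_natCast; xs[0] on a singleton is its head).
-- The fuel argument (= xs.length at the call) only makes the halving recursion structural.
def pvValF (fuel : Nat) (xs : List Int) : Int :=
  match fuel with
  | 0 => 0
  | f + 1 =>
    if xs.length = 0 then 0
    else if xs.length = 1 then xs.headD 0
    else
      let m := xs.length / 2
      pvValF f (xs.take m) * 12 ^ (xs.length - m) + pvValF f (xs.drop m)

def pvVal (xs : List Int) : Int := pvValF xs.length xs

-- _digits(v, n): n base-12 digits of v, big-endian, by recursive halving;
-- divmod(v, 12 ** m) with a positive divisor is (floordiv, mod).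
-- The fuel argument (= n at the call) only makes the halving recursion structural.
def pvDigitsF (fuel : Nat) (v : Int) (n : Nat) : List Int :=
  match fuel with
  | 0 => []
  | f + 1 =>
    if n = 0 then []
    else if n = 1 then [PySem.Int.mod v 12]
    else
      let m := n / 2
      pvDigitsF f (PySem.Int.floordiv v ((12 : Int) ^ m)) (n - m) ++
        pvDigitsF f (PySem.Int.mod v ((12 : Int) ^ m)) m

def pvDigitsBE (v : Int) (n : Nat) : List Int := pvDigitsF n v n

def add_base_12_alt (num1 : List Int) (num2 : List Int) : List Int :=
  let total := pvVal num1 + pvVal num2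
  let maxLen : Nat := max num1.length num2.length
  -- carry, lower = divmod(total, 12 ** max_len): the divisor is positive, so divmod is (floordiv, mod)
  let carry := PySem.Int.floordiv total ((12 : Int) ^ maxLen)
  let lower := PySem.Int.mod total ((12 : Int) ^ maxLen)
  let digits := pvDigitsBE lower maxLen
  (if carry > 0 then [carry] else []) ++ digits

-- ===== PRECONDITION & SPEC =====
def Spec_add_base_12 (num1 : List Int) (num2 : List Int) (out : List Int) : Prop := out = add_base_12_alt num1 num2
instance (num1 : List Int) (num2 : List Int) (out : List Int) : Decidable (Spec_add_base_12 num1 num2 out) := by unfold Spec_add_base_12; infer_instance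

-- ===== CLAIM (what is proved, stated in full; the proofs are below) =====
def Claim_equal_add_base_12 : Prop := ∀ (num1 : List Int) (num2 : List Int), Dom_add_base_12 num1 num2 → Spec_add_base_12 num1 num2 (add_base_12 num1 num2)

-- ===== LEMMAS AND PROOFS =====

-- little-endian value of a digit list
def pvValLE : List Int → Int
  | [] => 0
  | h :: t => h + 12 * pvValLE t

-- little-endian digit extraction, one digit at a time (the common normal form of
-- A's carry loop and B's halving extraction)
def pvDigitsLE : Nat → Int → List Int
  | 0, _ => []
  | n + 1, lower => PySem.Int.mod lower 12 :: pvDigitsLE n (PySem.Int.floordiv lower 12)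

-- A's loop, recast as structural recursion consuming both (reversed) lists head-first
def pvAddLE (r1 r2 : List Int) (c : Int) : Nat → Int × List Int
  | 0 => (c, [])
  | n + 1 =>
    let t := r1.headD 0 + r2.headD 0 + c
    let rest := pvAddLE r1.tail r2.tail (PySem.Int.floordiv t 12) n
    (rest.1, PySem.Int.mod t 12 :: rest.2)

lemma pvValLE_append (u v : List Int) :
    pvValLE (u ++ v) = pvValLE u + 12 ^ u.length * pvValLE v := by
  induction u with
  | nil => simp [pvValLE]
  | cons a t ih => simp [pvValLE, ih, pow_succ]; ring

lemma pvHeadTail (r : List Int) : pvValLE r = r.headD 0 + 12 * pvValLE r.tail := by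
  cases r <;> simp [pvValLE]

lemma pvModModTwelve (m : Nat) (x : Int) : x % 12 ^ (m + 1) % 12 = x % 12 :=
  Int.emod_emod_of_dvd _ (dvd_pow_self (12 : Int) (Nat.succ_ne_zero m))

lemma pvModDivPow (m : Nat) (x : Int) : x % 12 ^ (m + 1) / 12 = x / 12 % 12 ^ m := by
  have hdiv : x / 12 ^ (m + 1) = x / 12 / 12 ^ m := by
    rw [Int.ediv_ediv_of_nonneg (by norm_num : (0:Int) ≤ 12), pow_succ, mul_comm]
  have e1 : x % 12 ^ (m + 1) = x + -(x / 12 ^ (m + 1)) * 12 ^ (m + 1) := by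
    rw [neg_mul, ← sub_eq_add_neg, Int.emod_def]; ring
  have e2 : x % 12 ^ (m + 1) / 12 = x / 12 + -(x / 12 ^ (m + 1)) * 12 ^ m := by
    rw [e1]
    have : x + -(x / 12 ^ (m + 1)) * 12 ^ (m + 1)
        = x + (-(x / 12 ^ (m + 1)) * 12 ^ m) * 12 := by ring
    rw [this, Int.add_mul_ediv_right _ _ (by norm_num : (12:Int) ≠ 0)]
  rw [e2, Int.emod_def, hdiv]
  ring

-- digits of a remainder below 12^m are digits of the number itself
lemma pvDigitsLE_mod (m : Nat) : ∀ x : Int, pvDigitsLE m (x % 12 ^ m) = pvDigitsLE m x := by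
  induction m with
  | zero => intro x; rfl
  | succ k ih =>
    intro x
    have h12 : (0:Int) < 12 := by norm_num
    simp only [pvDigitsLE, PySem.Int.floordiv_eq_ediv_of_pos h12,
      PySem.Int.mod_eq_emod_of_pos h12, pvModModTwelve, pvModDivPow, ih]

-- splitting a little-endian digit expansion at position m
lemma pvDigitsLE_split (m : Nat) :
    ∀ (k : Nat) (x : Int), pvDigitsLE (m + k) x = pvDigitsLE m x ++ pvDigitsLE k (x / 12 ^ m) := by
  induction m with
  | zero => intro k x; simp [pvDigitsLE]
  | succ j ih =>
    intro k x
    have h12 : (0:Int) < 12 := by norm_num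
    have harith : j + 1 + k = (j + k) + 1 := by omega
    rw [harith]
    simp only [pvDigitsLE, PySem.Int.floordiv_eq_ediv_of_pos h12, ih k (x / 12),
      List.cons_append]
    have : x / 12 / 12 ^ j = x / 12 ^ (j + 1) := by
      rw [Int.ediv_ediv_of_nonneg (by norm_num : (0:Int) ≤ 12), pow_succ, mul_comm]
    rw [this]

-- B's halving extraction produces the reversed little-endian expansion
lemma pvDigitsF_eq (fuel : Nat) :
    ∀ (v : Int) (n : Nat), n ≤ fuel → pvDigitsF fuel v n = (pvDigitsLE n v).reverse := by
  induction fuel with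
  | zero =>
    intro v n hn
    rw [Nat.le_zero.mp hn]; rfl
  | succ f ih =>
    intro v n hn
    rw [pvDigitsF]
    by_cases h0 : n = 0
    · subst h0; rfl
    · by_cases h1 : n = 1
      · subst h1; rw [if_neg h0, if_pos rfl]; rfl
      · rw [if_neg h0, if_neg h1]
        have hp : (0:Int) < 12 ^ (n / 2) := by positivity
        show pvDigitsF f (PySem.Int.floordiv v ((12:Int) ^ (n / 2))) (n - n / 2) ++
            pvDigitsF f (PySem.Int.mod v ((12:Int) ^ (n / 2))) (n / 2) = _
        rw [ih _ _ (by omega), ih _ _ (by omega)]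
        have hsum : n / 2 + (n - n / 2) = n := by omega
        rw [PySem.Int.mod_eq_emod_of_pos hp, PySem.Int.floordiv_eq_ediv_of_pos hp,
          pvDigitsLE_mod]
        conv_rhs => rw [← hsum, pvDigitsLE_split (n / 2) (n - n / 2) v]
        rw [List.reverse_append]

lemma pvDigitsBE_eq (v : Int) (n : Nat) : pvDigitsBE v n = (pvDigitsLE n v).reverse :=
  pvDigitsF_eq n v n le_rfl

-- B's divide-and-conquer value is the little-endian value of the reversed list
lemma pvValF_eq (fuel : Nat) :
    ∀ xs : List Int, xs.length ≤ fuel → pvValF fuel xs = pvValLE xs.reverse := by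
  induction fuel with
  | zero =>
    intro xs hxs
    rw [List.length_eq_zero_iff.mp (Nat.le_zero.mp hxs)]; rfl
  | succ f ih =>
    intro xs hxs
    rw [pvValF]
    by_cases h0 : xs.length = 0
    · rw [if_pos h0, List.length_eq_zero_iff.mp h0]; rfl
    · by_cases h1 : xs.length = 1
      · obtain ⟨a, ha⟩ := List.length_eq_one_iff.mp h1
        subst ha
        rw [if_neg h0, if_pos h1]
        simp [pvValLE]
      · rw [if_neg h0, if_neg h1]
        show pvValF f (xs.take (xs.length / 2)) * 12 ^ (xs.length - xs.length / 2) +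
            pvValF f (xs.drop (xs.length / 2)) = _
        rw [ih _ (by simp only [List.length_take]; omega),
            ih _ (by simp only [List.length_drop]; omega)]
        have hsplit : xs.reverse
            = (xs.drop (xs.length / 2)).reverse ++ (xs.take (xs.length / 2)).reverse := by
          rw [← List.reverse_append, List.take_append_drop]
        rw [hsplit, pvValLE_append, List.length_reverse, List.length_drop]
        ring

lemma pvVal_eq (xs : List Int) : pvVal xs = pvValLE xs.reverse :=
  pvValF_eq xs.length xs le_rfl

-- A's foldl over range equals pvAddLE (accumulating the result list on the right)
lemma pvLoop (n : Nat) (r1 r2 : List Int) (c : Int) (acc : List Int) :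
    (List.range n).foldl
      (fun (s : Int × List Int) (k : Nat) =>
        let t := r1.getD k 0 + r2.getD k 0 + s.1
        (PySem.Int.floordiv t 12, s.2 ++ [PySem.Int.mod t 12])) (c, acc)
    = ((pvAddLE r1 r2 c n).1, acc ++ (pvAddLE r1 r2 c n).2) := by
  induction n generalizing r1 r2 c acc with
  | zero => simp [pvAddLE]
  | succ m ih =>
    rw [List.range_succ_eq_map, List.foldl_cons, List.foldl_map]
    have hbody : (fun (s : Int × List Int) (k : Nat) =>
        let t := r1.getD (Nat.succ k) 0 + r2.getD (Nat.succ k) 0 + s.1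
        (PySem.Int.floordiv t 12, s.2 ++ [PySem.Int.mod t 12]))
      = (fun (s : Int × List Int) (k : Nat) =>
        let t := r1.tail.getD k 0 + r2.tail.getD k 0 + s.1
        (PySem.Int.floordiv t 12, s.2 ++ [PySem.Int.mod t 12])) := by
      funext s k
      cases r1 <;> cases r2 <;> simp
    simp only [hbody, ih]
    have h1 : r1[0]?.getD 0 = r1.head?.getD 0 := by cases r1 <;> rfl
    have h2 : r2[0]?.getD 0 = r2.head?.getD 0 := by cases r2 <;> rfl
    simp [pvAddLE, h1, h2]

-- bulk characterisation of the carry loop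
lemma pvAddLE_eq (n : Nat) :
    ∀ (r1 r2 : List Int), r1.length ≤ n → r2.length ≤ n → ∀ (c : Int),
    pvAddLE r1 r2 c n =
      ((pvValLE r1 + pvValLE r2 + c) / 12 ^ n,
       pvDigitsLE n ((pvValLE r1 + pvValLE r2 + c) % 12 ^ n)) := by
  induction n with
  | zero =>
    intro r1 r2 h1 h2 c
    rw [List.length_eq_zero_iff.mp (Nat.le_zero.mp h1), List.length_eq_zero_iff.mp (Nat.le_zero.mp h2)]
    simp [pvAddLE, pvDigitsLE, pvValLE]
  | succ m ih =>
    intro r1 r2 h1 h2 c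
    have ht1 : r1.tail.length ≤ m := by cases r1 <;> simp_all
    have ht2 : r2.tail.length ≤ m := by cases r2 <;> simp_all
    set t : Int := r1.headD 0 + r2.headD 0 + c with hT
    have hx : pvValLE r1 + pvValLE r2 + c
        = t + (pvValLE r1.tail + pvValLE r2.tail) * 12 := by
      rw [pvHeadTail r1, pvHeadTail r2]; ring
    set x : Int := pvValLE r1 + pvValLE r2 + c with hX
    have h12 : (0:Int) < 12 := by norm_num
    have hstep : x / 12 = pvValLE r1.tail + pvValLE r2.tail + t / 12 := by
      rw [hx, Int.add_mul_ediv_right _ _ (by norm_num : (12:Int) ≠ 0)]; ring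
    have hdiv : x / 12 ^ (m + 1) = (x / 12) / 12 ^ m := by
      rw [Int.ediv_ediv_of_nonneg (by norm_num : (0:Int) ≤ 12), pow_succ, mul_comm]
    have hmod1 : x % 12 ^ (m + 1) % 12 = t % 12 := by
      rw [pvModModTwelve, hx, mul_comm, Int.add_mul_emod_self_left]
    show pvAddLE r1 r2 c (m + 1) = _
    rw [pvAddLE]
    simp only [← hT]
    rw [PySem.Int.floordiv_eq_ediv_of_pos h12, PySem.Int.mod_eq_emod_of_pos h12,
      ih r1.tail r2.tail ht1 ht2 (t / 12)]
    have hval : pvValLE r1.tail + pvValLE r2.tail + t / 12 = x / 12 := hstep.symm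
    rw [hval, ← hdiv]
    show (_, _) = (_, pvDigitsLE (m+1) (x % 12 ^ (m+1)))
    rw [pvDigitsLE]
    rw [PySem.Int.floordiv_eq_ediv_of_pos h12, PySem.Int.mod_eq_emod_of_pos h12,
      hmod1, pvModDivPow]

-- A's whole range-foldl equals pvAddLE (beta-reduced form, as it appears after unfolding A)
lemma pvLoopA (r1 r2 : List Int) :
    (PySem.List.pyRange 0 ((max r1.length r2.length : Nat) : Int) 1).foldl
      (fun (s : Int × List Int) i =>
        (PySem.Int.floordiv (((if i < (r1.length : Int) then PySem.List.pyGetD r1 i 0 else 0) +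
            (if i < (r2.length : Int) then PySem.List.pyGetD r2 i 0 else 0)) + s.1) 12,
         s.2 ++ [PySem.Int.mod (((if i < (r1.length : Int) then PySem.List.pyGetD r1 i 0 else 0) +
            (if i < (r2.length : Int) then PySem.List.pyGetD r2 i 0 else 0)) + s.1) 12]))
      ((0 : Int), ([] : List Int))
    = pvAddLE r1 r2 0 (max r1.length r2.length) := by
  rw [PySem.List.pyRange_zero_natCast, List.foldl_map]
  have hgd : ∀ (r : List Int) (k : Nat),
      (if (k : Int) < (r.length : Int) then PySem.List.pyGetD r (k : Int) 0 else 0) = r.getD k 0 := by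
    intro r k
    by_cases h : k < r.length
    · simp [h, PySem.List.pyGetD_natCast]
    · rw [if_neg (by exact_mod_cast h), List.getD_eq_default _ _ (Nat.le_of_not_lt h)]
  have hbody : (fun (s : Int × List Int) (k : Nat) =>
      (PySem.Int.floordiv (((if (k:Int) < (r1.length : Int) then PySem.List.pyGetD r1 (k:Int) 0 else 0) +
          (if (k:Int) < (r2.length : Int) then PySem.List.pyGetD r2 (k:Int) 0 else 0)) + s.1) 12,
       s.2 ++ [PySem.Int.mod (((if (k:Int) < (r1.length : Int) then PySem.List.pyGetD r1 (k:Int) 0 else 0) +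
          (if (k:Int) < (r2.length : Int) then PySem.List.pyGetD r2 (k:Int) 0 else 0)) + s.1) 12]))
    = (fun (s : Int × List Int) (k : Nat) =>
        let t := r1.getD k 0 + r2.getD k 0 + s.1
        (PySem.Int.floordiv t 12, s.2 ++ [PySem.Int.mod t 12])) := by
    funext s k
    simp only [hgd]
  rw [hbody, pvLoop]
  simp

-- ===== VERDICT (by name: the statement is the Claim_ definition above) =====
theorem add_base_12_spec : Claim_equal_add_base_12 := by
  intro num1 num2 _
  show add_base_12 num1 num2 = add_base_12_alt num1 num2
  simp only [add_base_12, add_base_12_alt]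
  rw [pvLoopA num1.reverse num2.reverse]
  have hn : max num1.reverse.length num2.reverse.length = max num1.length num2.length := by simp
  rw [hn, pvAddLE_eq (max num1.length num2.length) num1.reverse num2.reverse
    (by simp) (by simp) 0]
  have hp : (0:Int) < 12 ^ max num1.length num2.length := by positivity
  rw [pvVal_eq num1, pvVal_eq num2, PySem.Int.floordiv_eq_ediv_of_pos hp,
    PySem.Int.mod_eq_emod_of_pos hp, pvDigitsBE_eq]
  simp only [add_zero, pvDigitsLE_mod]
  by_cases hc : (pvValLE num1.reverse + pvValLE num2.reverse) / 12 ^ max num1.length num2.length > 0 <;>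
    simp [hc, List.reverse_append]
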